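-- pv_equiv track=rewrite | github.com/br7roy/hadoop-ecosystem | spark-python/learn/top.py | reduceLine
-- ===== SOURCE A (Python) =====
-- def reduceLine(x):
--     site = x[0]
--     locations = x[1]
--     locDict = {}
--     for loc in locations:
--         if loc in locDict:
--             locDict[loc] += 1
--         else:
--             locDict[loc] = 1
--
--     sortLocs = sorted(locDict.items(), key=lambda kv: kv[1], reverse=True)
--
--     if len(sortLocs) < 2:
--         return site, sortLocs
--
--     return site, sortLocs[:2]
-- ===== SOURCE B (Python) =====
-- def reduceLine(x):
--     site = x[0]
--     counts = {}
--     for loc in x[1]: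
--         counts[loc] = counts.get(loc, 0) + 1
--     best = None
--     second = None
--     for item in counts.items():
--         if best is None or item[1] > best[1]:
--             second = best
--             best = item
--         elif second is None or item[1] > second[1]:
--             second = item
--     return site, [t for t in (best, second) if t is not None]
-- ===== Notes on version B (the rewrite author's own statement) =====
-- stated objective: alternative
-- what changed: Replaces sorting the count dict's items by count (reverse) and slicing the first two by a single linear scan that maintains the top-2 entries, reproducing the stable sort's first-appearance tie-breaking; asymptotically O(m) instead of O(m log m) in the number m of distinct keys, but counting dominates, so not measurably faster.
import Mathlib
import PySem

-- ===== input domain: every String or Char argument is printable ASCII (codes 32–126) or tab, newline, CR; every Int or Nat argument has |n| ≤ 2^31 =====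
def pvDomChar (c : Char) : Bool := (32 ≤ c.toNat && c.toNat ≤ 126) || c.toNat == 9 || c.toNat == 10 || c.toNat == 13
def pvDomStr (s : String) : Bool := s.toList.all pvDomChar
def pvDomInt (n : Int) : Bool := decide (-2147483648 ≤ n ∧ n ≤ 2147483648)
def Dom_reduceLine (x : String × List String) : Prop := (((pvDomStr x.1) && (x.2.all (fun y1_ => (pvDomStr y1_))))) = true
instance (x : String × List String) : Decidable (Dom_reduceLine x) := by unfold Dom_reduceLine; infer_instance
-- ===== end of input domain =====

-- B replaces "sort the count dict's items by count (reverse) and slice the first two" by one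
-- linear scan maintaining the top-2 entries with the stable sort's first-appearance tie-break.

-- ===== PORT A =====
-- locDict[loc] += 1 under the 'loc in locDict' guard is exact as insert loc (getD loc 0 + 1)
def reduceLine (x : String × List String) : String × (List (String × Int)) :=
  let site := x.1
  let locations := x.2
  let locDict := locations.foldl
    (fun d loc => if d.contains loc then d.insert loc (d.getD loc 0 + 1) else d.insert loc 1)
    (PySem.Dict.empty : PySem.Dict String Int)
  let sortLocs := PySem.List.sorted locDict.items (fun kv => kv.2) true
  if PySem.List.len sortLocs < 2 then (site, sortLocs)
  else (site, PySem.List.slice sortLocs none (some 2))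

-- ===== PORT B =====
-- one iteration of Source B's top-2 scan: state = (best, second)
def pvScanStep (st : Option (String × Int) × Option (String × Int)) (item : String × Int) :
    Option (String × Int) × Option (String × Int) :=
  match st.1 with
  | none => (some item, st.1)          -- best is None: second = best; best = item
  | some b =>
    if b.2 < item.2 then (some item, some b)   -- item[1] > best[1]
    else
      match st.2 with
      | none => (st.1, some item)              -- second is None
      | some s => if s.2 < item.2 then (st.1, some item) else st

def reduceLine_alt (x : String × List String) : String × (List (String × Int)) :=
  let site := x.1
  let counts := x.2.foldl
    (fun d loc => d.insert loc (d.getD loc 0 + 1))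
    (PySem.Dict.empty : PySem.Dict String Int)
  let st := counts.items.foldl pvScanStep (none, none)
  (site, ([st.1, st.2] : List (Option (String × Int))).filterMap id)

-- ===== PRECONDITION & SPEC =====
def Spec_reduceLine (x : String × List String) (out : String × (List (String × Int))) : Prop := out = reduceLine_alt x
instance (x : String × List String) (out : String × (List (String × Int))) : Decidable (Spec_reduceLine x out) := by unfold Spec_reduceLine; infer_instance

-- ===== CLAIM (what is proved, stated in full; the proofs are below) =====
def Claim_equal_reduceLine : Prop := ∀ (x : String × List String), Dom_reduceLine x → Spec_reduceLine x (reduceLine x)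

-- ===== LEMMAS AND PROOFS =====

-- the first two elements of a list, as B's (best, second) state
def pvToPair (l : List (String × Int)) : Option (String × Int) × Option (String × Int) :=
  match l with
  | [] => (none, none)
  | [a] => (some a, none)
  | a :: b :: _ => (some a, some b)

-- (best, second) rendered as B's final list = the first two elements of the list it encodes
theorem pvPairToList_toPair (l : List (String × Int)) :
    ([(pvToPair l).1, (pvToPair l).2].filterMap id) = l.take 2 := by
  match l with
  | [] => rfl
  | [a] => rfl
  | a :: b :: t => rfl

-- one stable-reverse insertion step, seen through the first two elements
theorem pvToPair_insertBy (ys : List (String × Int)) (x : String × Int) :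
    pvToPair (PySem.List.insertBy (fun a b => decide (b.2 < a.2)) x ys)
      = pvScanStep (pvToPair ys) x := by
  match ys with
  | [] => rfl
  | [a] =>
    simp only [PySem.List.insertBy, pvToPair, pvScanStep]
    by_cases h : a.2 < x.2 <;> simp [h]
  | a :: b :: t =>
    simp only [PySem.List.insertBy, pvToPair, pvScanStep]
    by_cases h1 : a.2 < x.2
    · simp [h1]
    · by_cases h2 : b.2 < x.2 <;> simp [h1, h2]

-- the whole insertion-sort fold, seen through the first two elements, is B's scan
theorem pvToPair_foldl (p : List (String × Int)) (acc : List (String × Int)) :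
    pvToPair (p.foldl (fun acc x => PySem.List.insertBy (fun a b => decide (b.2 < a.2)) x acc) acc)
      = p.foldl pvScanStep (pvToPair acc) := by
  induction p generalizing acc with
  | nil => rfl
  | cons x p ih => rw [List.foldl_cons, List.foldl_cons, ih, pvToPair_insertBy]

-- A's counting loop builds the same dict as B's
theorem pvDict_eq (locs : List String) :
    locs.foldl
      (fun d loc => if d.contains loc then d.insert loc (d.getD loc 0 + 1) else d.insert loc 1)
      (PySem.Dict.empty : PySem.Dict String Int)
    = locs.foldl (fun d loc => d.insert loc (d.getD loc 0 + 1))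
      (PySem.Dict.empty : PySem.Dict String Int) := by
  have : (fun (d : PySem.Dict String Int) loc =>
      if d.contains loc then d.insert loc (d.getD loc 0 + 1) else d.insert loc 1)
      = fun d loc => d.insert loc (d.getD loc 0 + 1) := by
    funext d loc
    by_cases h : d.contains loc
    · simp [h]
    · simp only [h, Bool.false_eq_true, if_false]
      rw [PySem.Dict.getD_of_not_contains _ _ (by simpa using h)]
      norm_num
  rw [this]

-- ===== VERDICT (by name: the statement is the Claim_ definition above) =====
theorem reduceLine_spec : Claim_equal_reduceLine := by
  intro x _
  show reduceLine x = reduceLine_alt x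
  unfold reduceLine reduceLine_alt
  simp only [pvDict_eq]
  set d := x.2.foldl (fun d loc => d.insert loc (d.getD loc 0 + 1))
    (PySem.Dict.empty : PySem.Dict String Int) with hd
  set S := PySem.List.sorted d.items (fun kv => kv.2) true with hS
  have hfold : pvToPair S = d.items.foldl pvScanStep (none, none) := by
    rw [hS, PySem.List.sorted_rev_eq_foldl_insertBy]
    exact pvToPair_foldl _ []
  have hB : ([(d.items.foldl pvScanStep (none, none)).1,
      (d.items.foldl pvScanStep (none, none)).2].filterMap id) = S.take 2 := by
    rw [← hfold]; exact pvPairToList_toPair S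
  by_cases hlen : PySem.List.len S < 2
  · have h2 : S.length < 2 := by simpa [PySem.List.len_eq] using hlen
    simp only [hlen, if_pos, hB]
    rw [List.take_of_length_le (by omega)]
  · simp only [hlen, if_neg, hB, not_false_iff]
    rw [PySem.List.slice_to S (by norm_num : (0:Int) ≤ 2)]
    rfl
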